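-- pv_equiv track=rewrite | github.com/sheersh03/Datox-Initial | server/app/api/routers/subscriptions.py | _extract_addon_from_product
-- ===== SOURCE A (Python) =====
-- ADDON_PRODUCT_MAP = {
--     "spotlight": ("spotlight", 1),
--     "super_swipe": ("super_swipe", 5),
--     "superswipe": ("super_swipe", 5),
--     "boost": ("boost", 1),
--     "compliment": ("compliment", 5),
--     "compliments": ("compliment", 5),
--     "extend": ("extend", 1),
--     "extends": ("extend", 1),
--     "rematch": ("rematch", 1),
--     "backtrack": ("backtrack", 1),
--     "travel_mode": ("travel_mode", 1),
--     "incognito": ("incognito", 1),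
-- }
--
-- def _extract_addon_from_product(product_id: str) -> tuple[str, int] | None:
--     norm = product_id.lower().replace("-", "_")
--     if norm in ADDON_PRODUCT_MAP:
--         return ADDON_PRODUCT_MAP[norm]
--     # Handle com.app.spotlight -> extract "spotlight"
--     for key in ADDON_PRODUCT_MAP:
--         if norm.endswith("_" + key) or norm == key:
--             return ADDON_PRODUCT_MAP[key]
--     return None
-- ===== SOURCE B (Python) =====
-- ADDON_PRODUCT_MAP = {
--     "spotlight": ("spotlight", 1),
--     "super_swipe": ("super_swipe", 5),
--     "superswipe": ("super_swipe", 5),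
--     "boost": ("boost", 1),
--     "compliment": ("compliment", 5),
--     "compliments": ("compliment", 5),
--     "extend": ("extend", 1),
--     "extends": ("extend", 1),
--     "rematch": ("rematch", 1),
--     "backtrack": ("backtrack", 1),
--     "travel_mode": ("travel_mode", 1),
--     "incognito": ("incognito", 1),
-- }
--
-- def _extract_addon_from_product(product_id: str) -> "tuple[str, int] | None":
--     norm = product_id.lower().replace("-", "_")
--     hit = ADDON_PRODUCT_MAP.get(norm)
--     if hit is not None:
--         return hit
--     # Instead of scanning the map's keys for a suffix match, look up each
--     # suffix of norm that starts right after an underscore.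
--     for i, ch in enumerate(norm):
--         if ch == "_":
--             hit = ADDON_PRODUCT_MAP.get(norm[i + 1:])
--             if hit is not None:
--                 return hit
--     return None
-- ===== Notes on version B (the rewrite author's own statement) =====
-- stated objective: alternative
-- what changed: Instead of scanning every map key and testing whether the normalized id ends with that key, B walks the normalized id and looks up each suffix starting right after an underscore directly in the dict, returning the first hit.
import Mathlib
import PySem

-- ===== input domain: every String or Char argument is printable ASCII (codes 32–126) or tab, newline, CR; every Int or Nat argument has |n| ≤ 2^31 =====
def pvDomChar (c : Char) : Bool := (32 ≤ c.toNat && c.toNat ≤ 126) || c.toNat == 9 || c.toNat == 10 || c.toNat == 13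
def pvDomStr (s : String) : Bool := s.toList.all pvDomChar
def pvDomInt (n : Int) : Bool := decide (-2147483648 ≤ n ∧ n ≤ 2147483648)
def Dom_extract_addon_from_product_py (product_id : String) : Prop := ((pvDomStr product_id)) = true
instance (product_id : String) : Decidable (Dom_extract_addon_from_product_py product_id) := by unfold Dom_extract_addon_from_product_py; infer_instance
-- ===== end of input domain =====

-- B replaces A's scan over all map keys testing `endswith` by O(1) dict lookups of the
-- suffixes of `norm` that start right after an underscore (objective: alternative).

-- ===== PORT A =====
def pvAddonMap : PySem.Dict String (String × Int) := PySem.Dict.ofList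
  [ ("spotlight", ("spotlight", 1)), ("super_swipe", ("super_swipe", 5)),
    ("superswipe", ("super_swipe", 5)), ("boost", ("boost", 1)),
    ("compliment", ("compliment", 5)), ("compliments", ("compliment", 5)),
    ("extend", ("extend", 1)), ("extends", ("extend", 1)),
    ("rematch", ("rematch", 1)), ("backtrack", ("backtrack", 1)),
    ("travel_mode", ("travel_mode", 1)), ("incognito", ("incognito", 1)) ]

-- A's `for key in ADDON_PRODUCT_MAP:` loop; `ADDON_PRODUCT_MAP[key]` is ported as get?
-- (exact: key is drawn from the map's own keys, so the lookup never raises)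
def pvALoop (norm : String) : List String → Option (String × Int)
  | [] => none
  | k :: ks =>
    if PySem.Str.endswith norm ("_" ++ k) || norm == k then pvAddonMap.get? k
    else pvALoop norm ks

def extract_addon_from_product_py (product_id : String) : Option (String × Int) :=
  let norm := PySem.Str.replace (PySem.Str.lower product_id) "-" "_"
  match pvAddonMap.get? norm with
  | some v => some v
  | none => pvALoop norm (PySem.Dict.keys pvAddonMap)

-- ===== PORT B =====
-- B's `for i, ch in enumerate(norm): if ch == "_": ADDON_PRODUCT_MAP.get(norm[i+1:])`,
-- as a recursion where `rest` is exactly the slice norm[i+1:]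
def pvBScan : List Char → Option (String × Int)
  | [] => none
  | c :: rest =>
    if c = '_' then
      match pvAddonMap.get? (String.ofList rest) with
      | some v => some v
      | none => pvBScan rest
    else pvBScan rest

def extract_addon_from_product_py_alt (product_id : String) : Option (String × Int) :=
  let norm := PySem.Str.replace (PySem.Str.lower product_id) "-" "_"
  match pvAddonMap.get? norm with
  | some v => some v
  | none => pvBScan norm.toList

-- ===== PRECONDITION & SPEC =====
def Spec_extract_addon_from_product_py (product_id : String) (out : Option (String × Int)) : Prop := out = extract_addon_from_product_py_alt product_id
instance (product_id : String) (out : Option (String × Int)) : Decidable (Spec_extract_addon_from_product_py product_id out) := by unfold Spec_extract_addon_from_product_py; infer_instance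

-- ===== CLAIM (what is proved, stated in full; the proofs are below) =====
def Claim_equal_extract_addon_from_product_py : Prop := ∀ (product_id : String), Dom_extract_addon_from_product_py product_id → Spec_extract_addon_from_product_py product_id (extract_addon_from_product_py product_id)

-- ===== LEMMAS AND PROOFS =====

def pvKeys : List String :=
  ["spotlight", "super_swipe", "superswipe", "boost", "compliment", "compliments",
   "extend", "extends", "rematch", "backtrack", "travel_mode", "incognito"]

theorem pvKeys_eq : PySem.Dict.keys pvAddonMap = pvKeys := by decide

-- no map key, prefixed with '_', is a suffix of another map key so prefixed
theorem pvU : ∀ k1 ∈ pvKeys, ∀ k2 ∈ pvKeys,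
    ('_' :: k1.toList) <:+ ('_' :: k2.toList) → k1 = k2 := by
  have hb : (pvKeys.all fun a => pvKeys.all fun b =>
      !(('_' :: a.toList).isSuffixOf ('_' :: b.toList)) || a == b) = true := by decide
  intro k1 h1 k2 h2 hs
  have h := (List.all_eq_true.mp ((List.all_eq_true.mp hb) k1 h1)) k2 h2
  have hsb : ('_' :: k1.toList).isSuffixOf ('_' :: k2.toList) = true :=
    List.isSuffixOf_iff_suffix.mpr hs
  simpa [hsb] using h

theorem pvFindCongr {α : Type} (p q : α → Bool) (l : List α)
    (h : ∀ x ∈ l, p x = q x) : l.find? p = l.find? q := by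
  induction l with
  | nil => rfl
  | cons a t ih =>
    have ha := h a (by simp)
    simp only [List.find?_cons, ha]
    cases q a <;> simp [ih fun x hx => h x (by simp [hx])]

theorem pvNotMem_of_get?_none {s : String} (h : pvAddonMap.get? s = none) :
    ∀ k ∈ pvKeys, s ≠ k := by
  intro k hk he
  have hm : s ∉ pvAddonMap.keys := (PySem.Dict.get?_eq_none_iff_not_mem_keys _ _).mp h
  exact hm (by rw [pvKeys_eq]; exact he ▸ hk)

theorem pvMem_of_get?_some {s : String} {v : String × Int}
    (h : pvAddonMap.get? s = some v) : s ∈ pvKeys := by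
  rw [← pvKeys_eq]
  by_contra hn
  rw [(PySem.Dict.get?_eq_none_iff_not_mem_keys _ _).mpr hn] at h
  simp at h

-- A's loop (with the redundant `norm == key` removed) as a find? over the keys
theorem pvALoop_eq_find (norm : String) (ks : List String)
    (h : ∀ k ∈ ks, norm ≠ k) :
    pvALoop norm ks
      = (ks.find? fun k => ('_' :: k.toList).isSuffixOf norm.toList).bind
          (fun k => pvAddonMap.get? k) := by
  induction ks with
  | nil => rfl
  | cons k t ih =>
    have hne : (norm == k) = false := by
      simpa using h k (by simp)
    have hend : PySem.Str.endswith norm ("_" ++ k)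
        = ('_' :: k.toList).isSuffixOf norm.toList := by
      rcases hb : ('_' :: k.toList).isSuffixOf norm.toList with _ | _
      · rw [Bool.eq_false_iff]
        intro hc
        have hs : ('_' :: k.toList) <:+ norm.toList := by
          have h2 := (PySem.Chars.endswith_iff norm.toList ("_" ++ k).toList).mp
            (by simpa using hc)
          simpa using h2
        have h3 := List.isSuffixOf_iff_suffix.mpr hs
        simp [h3] at hb
      · have hs : ('_' :: k.toList) <:+ norm.toList := List.isSuffixOf_iff_suffix.mp hb
        have h2 := (PySem.Chars.endswith_iff norm.toList ("_" ++ k).toList).mpr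
          (by simpa using hs)
        simpa using h2
    simp only [pvALoop, List.find?_cons, hne, Bool.or_false, hend]
    cases hb : ('_' :: k.toList).isSuffixOf norm.toList with
    | true => simp
    | false => simpa using ih fun x hx => h x (by simp [hx])

-- B's suffix scan computes the same find?-then-lookup
theorem pvBScan_eq (l : List Char) :
    pvBScan l
      = (pvKeys.find? fun k => ('_' :: k.toList).isSuffixOf l).bind
          (fun k => pvAddonMap.get? k) := by
  induction l with
  | nil => decide
  | cons c rest ih =>
    by_cases hc : c = '_'
    · subst hc
      cases hg : pvAddonMap.get? (String.ofList rest) with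
      | some v =>
        have hmem : String.ofList rest ∈ pvKeys := pvMem_of_get?_some hg
        have hp : (('_' :: (String.ofList rest).toList).isSuffixOf ('_' :: rest)) = true := by
          simp [List.isSuffixOf_iff_suffix]
        have hsome : (pvKeys.find? fun k => ('_' :: k.toList).isSuffixOf ('_' :: rest)).isSome := by
          rw [List.find?_isSome]
          exact ⟨String.ofList rest, hmem, hp⟩
        obtain ⟨k1, hk1⟩ := Option.isSome_iff_exists.mp hsome
        have hk1mem : k1 ∈ pvKeys := List.mem_of_find?_eq_some hk1
        have hk1b : (('_' :: k1.toList).isSuffixOf ('_' :: rest)) = true := by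
          simpa using List.find?_some hk1
        have hk1p : ('_' :: k1.toList) <:+ ('_' :: rest) :=
          List.isSuffixOf_iff_suffix.mp hk1b
        have hkeq : k1 = String.ofList rest := by
          apply pvU k1 hk1mem (String.ofList rest) hmem
          simpa [String.toList_ofList] using hk1p
        subst hkeq
        simp [pvBScan, hk1, hg]
      | none =>
        have hcong : ∀ k ∈ pvKeys,
            (('_' :: k.toList).isSuffixOf ('_' :: rest))
              = (('_' :: k.toList).isSuffixOf rest) := by
          intro k hk
          have hne : k.toList ≠ rest := by
            intro he
            refine pvNotMem_of_get?_none hg k hk ?_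
            rw [← he, String.ofList_toList]
          rcases hb : ('_' :: k.toList).isSuffixOf rest with _ | _
          · rw [Bool.eq_false_iff]
            intro hcns
            have h2 := List.isSuffixOf_iff_suffix.mp hcns
            rcases List.suffix_cons_iff.mp h2 with h1 | h1
            · exact hne (by simpa using h1)
            · have h3 := List.isSuffixOf_iff_suffix.mpr h1
              simp [h3] at hb
          · exact List.isSuffixOf_iff_suffix.mpr
              ((List.isSuffixOf_iff_suffix.mp hb).trans (List.suffix_cons '_' rest))
        rw [pvFindCongr _ _ _ hcong]
        simp only [pvBScan, hg]
        exact ih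
    · have hcong : ∀ k ∈ pvKeys,
          (('_' :: k.toList).isSuffixOf (c :: rest))
            = (('_' :: k.toList).isSuffixOf rest) := by
        intro k _
        rcases hb : ('_' :: k.toList).isSuffixOf rest with _ | _
        · rw [Bool.eq_false_iff]
          intro hcns
          have h2 := List.isSuffixOf_iff_suffix.mp hcns
          rcases List.suffix_cons_iff.mp h2 with h1 | h1
          · exact hc (List.head_eq_of_cons_eq h1).symm
          · have h3 := List.isSuffixOf_iff_suffix.mpr h1
            simp [h3] at hb
        · exact List.isSuffixOf_iff_suffix.mpr
            ((List.isSuffixOf_iff_suffix.mp hb).trans (List.suffix_cons c rest))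
      rw [pvFindCongr _ _ _ hcong]
      simp only [pvBScan, if_neg hc]
      exact ih

-- ===== VERDICT (by name: the statement is the Claim_ definition above) =====
theorem extract_addon_from_product_py_spec : Claim_equal_extract_addon_from_product_py := by
  intro product_id _
  unfold Spec_extract_addon_from_product_py
  unfold extract_addon_from_product_py extract_addon_from_product_py_alt
  set norm := PySem.Str.replace (PySem.Str.lower product_id) "-" "_" with hn
  cases hg : pvAddonMap.get? norm with
  | some v => simp only [hg]
  | none =>
    simp only [hg]
    rw [pvKeys_eq, pvALoop_eq_find norm pvKeys (pvNotMem_of_get?_none hg), pvBScan_eq]
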